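-- pv_equiv track=rewrite | github.com/microsoft/CodeMixed-Text-Generator | cm_text_generator/equivalence_constraint_lattice.py | wellformedIfMonolingualGeneric
-- ===== SOURCE A (Python) =====
-- def wellformedIfMonolingualGeneric(string1, string2, engSentence, hinSentence):
--
--     word1 = string1[:-2]
--     word2 = string2[:-2]
--     tokens1 = engSentence.split(" ")
--     tokens2 = hinSentence.split(" ")
--
--     # print word1, word2
--
--     if word1 in tokens1 and word2 in tokens1:
--         for i in range(len(tokens1)-1):
--             if tokens1[i] == word1 and tokens1[i+1] == word2:
--                 # print "true"
--                 return True
--         # print "false"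
--         return False
--
--     if word1 in tokens2 and word2 in tokens2:
--         for j in range(len(tokens2)-1):
--             if tokens2[j] == word1 and tokens2[j+1] == word2:
--                 # print "true"
--                 return True
--         # print "false"
--         return False
--
--     return True
-- ===== SOURCE B (Python) =====
-- def wellformedIfMonolingualGeneric(string1, string2, engSentence, hinSentence):
--     word1 = string1[:-2]
--     word2 = string2[:-2]
--
--     def scan(sentence):
--         # one pass: membership of both words and adjacency, tracked together
--         has1 = has2 = adj = False
--         prev = None
--         for tok in sentence.split(" "):
--             if tok == word1:
--                 has1 = True
--             if tok == word2:
--                 has2 = True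
--             if prev == word1 and tok == word2:
--                 adj = True
--             prev = tok
--         return has1, has2, adj
--
--     h1, h2, a = scan(engSentence)
--     if h1 and h2:
--         return a
--     h1, h2, a = scan(hinSentence)
--     if h1 and h2:
--         return a
--     return True
-- ===== Notes on version B (the rewrite author's own statement) =====
-- stated objective: alternative
-- what changed: Replaces A's staged passes (two membership tests, then an index-based adjacency rescan) with a single state-machine pass per sentence that accumulates both membership flags and the adjacency flag while remembering only the previous token.
import Mathlib
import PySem

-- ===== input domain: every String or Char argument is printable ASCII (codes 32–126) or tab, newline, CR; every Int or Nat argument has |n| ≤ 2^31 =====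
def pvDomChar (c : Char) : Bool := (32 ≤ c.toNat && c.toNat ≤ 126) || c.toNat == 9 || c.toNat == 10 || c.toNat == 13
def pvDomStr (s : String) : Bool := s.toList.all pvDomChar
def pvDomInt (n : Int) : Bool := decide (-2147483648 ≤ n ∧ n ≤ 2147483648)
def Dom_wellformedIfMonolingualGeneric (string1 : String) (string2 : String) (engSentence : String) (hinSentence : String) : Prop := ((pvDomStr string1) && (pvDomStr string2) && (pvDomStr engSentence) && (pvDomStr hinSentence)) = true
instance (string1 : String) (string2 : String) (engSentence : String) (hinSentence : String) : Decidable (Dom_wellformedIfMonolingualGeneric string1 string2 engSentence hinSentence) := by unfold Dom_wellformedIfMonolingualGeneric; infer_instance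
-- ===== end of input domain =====

-- B replaces A's staged passes (membership guards, then an index-based adjacency rescan) with one
-- single-pass state machine per sentence accumulating both membership flags and the adjacency flag
-- while remembering only the previous token (objective: alternative).

-- ===== PORT A =====
-- A's inner 'for i in range(len(tokens)-1): if tokens[i]==word1 and tokens[i+1]==word2: return True / return False'
-- (indices produced by the range are always in bounds, so the total pyGetD with default "" is exact)
def pvScanA (tokens : List String) (word1 word2 : String) : Bool :=
  (PySem.List.pyRange 0 ((tokens.length : Int) - 1) 1).any (fun i =>
    (PySem.List.pyGetD tokens i "" == word1) && (PySem.List.pyGetD tokens (i + 1) "" == word2))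

def wellformedIfMonolingualGeneric (string1 : String) (string2 : String) (engSentence : String) (hinSentence : String) : Bool :=
  let word1 := PySem.Str.slice string1 none (some (-2))
  let word2 := PySem.Str.slice string2 none (some (-2))
  let tokens1 := (PySem.Str.split? engSentence " ").getD []
  let tokens2 := (PySem.Str.split? hinSentence " ").getD []
  if tokens1.contains word1 && tokens1.contains word2 then
    pvScanA tokens1 word1 word2
  else if tokens2.contains word1 && tokens2.contains word2 then
    pvScanA tokens2 word1 word2
  else
    true

-- ===== PORT B =====
-- Source B's loop body: update has1/has2/adj from the current token and remember it as prev
def pvStepB (word1 word2 : String) (st : Bool × Bool × Bool × Option String) (tok : String) :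
    Bool × Bool × Bool × Option String :=
  (st.1 || tok == word1, st.2.1 || tok == word2,
   st.2.2.1 || (st.2.2.2 == some word1 && tok == word2), some tok)

-- Source B's scan helper: one pass over the tokens, prev starts as None
def pvScanB (word1 word2 : String) (sentence : String) : Bool × Bool × Bool × Option String :=
  ((PySem.Str.split? sentence " ").getD []).foldl (pvStepB word1 word2) (false, false, false, none)

def wellformedIfMonolingualGeneric_alt (string1 : String) (string2 : String) (engSentence : String) (hinSentence : String) : Bool :=
  let word1 := PySem.Str.slice string1 none (some (-2))
  let word2 := PySem.Str.slice string2 none (some (-2))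
  let r1 := pvScanB word1 word2 engSentence
  if r1.1 && r1.2.1 then r1.2.2.1
  else
    let r2 := pvScanB word1 word2 hinSentence
    if r2.1 && r2.2.1 then r2.2.2.1
    else true

-- ===== PRECONDITION & SPEC =====
def Spec_wellformedIfMonolingualGeneric (string1 : String) (string2 : String) (engSentence : String) (hinSentence : String) (out : Bool) : Prop := out = wellformedIfMonolingualGeneric_alt string1 string2 engSentence hinSentence
instance (string1 : String) (string2 : String) (engSentence : String) (hinSentence : String) (out : Bool) : Decidable (Spec_wellformedIfMonolingualGeneric string1 string2 engSentence hinSentence out) := by unfold Spec_wellformedIfMonolingualGeneric; infer_instance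

-- ===== CLAIM =====
def Claim_equal_wellformedIfMonolingualGeneric : Prop := ∀ (string1 : String) (string2 : String) (engSentence : String) (hinSentence : String), Dom_wellformedIfMonolingualGeneric string1 string2 engSentence hinSentence → Spec_wellformedIfMonolingualGeneric string1 string2 engSentence hinSentence (wellformedIfMonolingualGeneric string1 string2 engSentence hinSentence)

-- ===== LEMMAS AND PROOFS =====

-- A's range-indexed scan, with the range normalized to Nat indices
lemma pvScanA_eq_range (tokens : List String) (w1 w2 : String) :
    pvScanA tokens w1 w2 =
      (List.range (tokens.length - 1)).any (fun k =>
        (tokens.getD k "" == w1) && (tokens.getD (k + 1) "" == w2)) := by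
  unfold pvScanA
  rw [PySem.List.pyRange_one, List.any_map]
  have hlen : ((tokens.length : Int) - 1 - 0).toNat = tokens.length - 1 := by omega
  rw [hlen]
  congr 1
  funext k
  simp only [Function.comp_def, zero_add]
  rw [PySem.List.pyGetD_natCast]
  rw [show ((k : Int) + 1) = ((k + 1 : Nat) : Int) by push_cast; ring,
    PySem.List.pyGetD_natCast]

-- the Nat-indexed scan equals the prev-tracking adjacency starting from a given previous token
def pvAdjFrom (w1 w2 : String) : Option String → List String → Bool
  | _, [] => false
  | p, t :: rest => (p == some w1 && t == w2) || pvAdjFrom w1 w2 (some t) rest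

lemma range_scan_eq_adjFrom (w1 w2 : String) :
    ∀ (tokens : List String),
      (List.range (tokens.length - 1)).any (fun k =>
        (tokens.getD k "" == w1) && (tokens.getD (k + 1) "" == w2)) =
      pvAdjFrom w1 w2 none tokens
  | [] => by simp [pvAdjFrom]
  | [a] => by simp [pvAdjFrom]
  | a :: b :: rest => by
    have ih := range_scan_eq_adjFrom w1 w2 (b :: rest)
    simp only [List.length_cons, Nat.add_sub_cancel, List.range_succ_eq_map,
      List.any_cons, List.any_map, Function.comp_def, Nat.succ_eq_add_one,
      List.getD_cons_zero, List.getD_cons_succ, pvAdjFrom] at *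
    rw [ih]
    simp

-- the fold of Source B's loop body computes (membership, membership, adjacency-from-prev, last token)
lemma foldl_stepB (w1 w2 : String) :
    ∀ (l : List String) (h1 h2 adj : Bool) (prev : Option String),
      l.foldl (pvStepB w1 w2) (h1, h2, adj, prev) =
        (h1 || l.contains w1, h2 || l.contains w2, adj || pvAdjFrom w1 w2 prev l,
         l.getLast?.or prev) := by
  intro l
  induction l with
  | nil => intro h1 h2 adj prev; simp [pvAdjFrom]
  | cons t rest ih =>
    intro h1 h2 adj prev
    simp only [List.foldl_cons, pvStepB, pvAdjFrom, List.contains_cons]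
    rw [ih]
    simp [List.getLast?_cons, Bool.or_assoc]
    refine ⟨?_, ?_⟩ <;> rw [BEq.comm]

lemma pvScanB_eq (w1 w2 : String) (s : String) :
    pvScanB w1 w2 s =
      (((PySem.Str.split? s " ").getD []).contains w1,
       ((PySem.Str.split? s " ").getD []).contains w2,
       pvAdjFrom w1 w2 none ((PySem.Str.split? s " ").getD []),
       ((PySem.Str.split? s " ").getD []).getLast?.or none) := by
  unfold pvScanB
  rw [foldl_stepB]
  simp

lemma pvScanA_eq_adjFrom (tokens : List String) (w1 w2 : String) :
    pvScanA tokens w1 w2 = pvAdjFrom w1 w2 none tokens := by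
  rw [pvScanA_eq_range, range_scan_eq_adjFrom]

-- ===== VERDICT =====
theorem wellformedIfMonolingualGeneric_spec : Claim_equal_wellformedIfMonolingualGeneric := by
  intro s1 s2 e h _
  unfold Spec_wellformedIfMonolingualGeneric
  simp only [wellformedIfMonolingualGeneric, wellformedIfMonolingualGeneric_alt,
    pvScanB_eq]
  split_ifs <;> first | rfl | exact pvScanA_eq_adjFrom _ _ _
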